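-- pv_equiv track=rewrite | github.com/Frosselet/COCOINDEX_LEARNING | colpali_engine/outputs/exporters.py | _is_tabular
-- ===== SOURCE A (Python) =====
-- from typing import Dict, Any, List, Optional, Union
--
-- def _is_tabular(data: Dict[str, Any]) -> bool:
--     """
--     Check if dictionary represents tabular data.
--
--     Args:
--         data: Dictionary to check
--
--     Returns:
--         True if data represents a table (dict of equal-length lists)
--     """
--     if not data:
--         return False
--
--     # Check if all values are lists
--     values = list(data.values())
--     if not all(isinstance(v, list) for v in values):
--         return False
--
--     # Check if all lists have same length
--     lengths = [len(v) for v in values]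
--     return len(set(lengths)) == 1
-- ===== SOURCE B (Python) =====
-- def _is_tabular(data):
--     """
--     Check if dictionary represents tabular data (dict of equal-length lists).
--
--     One early-exit pass: anchor on the first value's length and compare the
--     rest against it, instead of collecting all lengths and deduplicating.
--     """
--     it = iter(data.values())
--     first = next(it, None)
--     if first is None or not isinstance(first, list):
--         return False
--     n = len(first)
--     for v in it:
--         if not isinstance(v, list) or len(v) != n:
--             return False
--     return True
-- ===== Notes on version B (the rewrite author's own statement) =====
-- stated objective: simpler
-- what changed: Replaces A's two passes (all-isinstance check, then build a lengths list and count its set) with a single early-exit pass that anchors on the first value's length and compares every remaining value against it.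
import Mathlib
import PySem

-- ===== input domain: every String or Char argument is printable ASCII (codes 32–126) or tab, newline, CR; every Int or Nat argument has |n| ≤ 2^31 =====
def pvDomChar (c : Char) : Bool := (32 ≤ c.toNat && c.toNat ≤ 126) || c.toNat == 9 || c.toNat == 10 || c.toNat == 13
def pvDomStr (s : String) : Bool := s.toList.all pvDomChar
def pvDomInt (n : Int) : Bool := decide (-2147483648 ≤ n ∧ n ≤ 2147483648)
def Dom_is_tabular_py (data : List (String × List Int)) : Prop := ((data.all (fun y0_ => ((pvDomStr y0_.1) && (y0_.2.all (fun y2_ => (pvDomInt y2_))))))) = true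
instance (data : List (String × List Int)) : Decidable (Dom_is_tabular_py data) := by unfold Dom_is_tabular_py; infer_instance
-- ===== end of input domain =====

-- B replaces A's two passes (isinstance check, then lengths-set cardinality) with one
-- early-exit pass comparing each value's length to the first value's length.


-- ===== PORT A =====
-- `if not data: return False`; all values are lists by the declared type, so the
-- `all(isinstance(v, list) ...)` guard is the constant true check, kept in place;
-- then lengths = [len(v) for v in values]; len(set(lengths)) == 1.
def is_tabular_py (data : List (String × List Int)) : Bool :=
  if data.isEmpty then false
  else
    let values := data.map (·.2)
    if !(values.all (fun _ => true)) then false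
    else
      let lengths : List Int := values.map (fun v => (v.length : Int))
      (PySem.Set.ofList lengths).length == 1

-- ===== PORT B =====
-- first value anchors the reference length n; early-exit scan of the rest.
def is_tabular_py_alt (data : List (String × List Int)) : Bool :=
  match data with
  | [] => false
  | (_, first) :: rest =>
    let n := first.length
    rest.all (fun p => p.2.length == n)

-- ===== PRECONDITION & SPEC =====
def Spec_is_tabular_py (data : List (String × List Int)) (out : Bool) : Prop := out = is_tabular_py_alt data
instance (data : List (String × List Int)) (out : Bool) : Decidable (Spec_is_tabular_py data out) := by unfold Spec_is_tabular_py; infer_instance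

-- ===== CLAIM (what is proved, stated in full; the proofs are below) =====
def Claim_equal_is_tabular_py : Prop := ∀ (data : List (String × List Int)), Dom_is_tabular_py data → Spec_is_tabular_py data (is_tabular_py data)

-- ===== LEMMAS AND PROOFS =====

-- the set-of-lengths has one element iff every later length equals the first
theorem setOfList_len_one_iff (a : Int) (l : List Int) :
    (PySem.Set.ofList (a :: l)).length = 1 ↔ ∀ x ∈ l, x = a := by
  constructor
  · intro h x hx
    have hxs : x ∈ PySem.Set.ofList (a :: l) := by
      rw [PySem.Set.mem_ofList]; exact List.mem_cons_of_mem _ hx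
    have has : a ∈ PySem.Set.ofList (a :: l) := by
      rw [PySem.Set.mem_ofList]; exact List.mem_cons_self
    match hs : PySem.Set.ofList (a :: l), h with
    | [b], _ =>
      rw [hs, List.mem_singleton] at hxs has
      rw [hxs, has]
  · intro h
    have has : a ∈ PySem.Set.ofList (a :: l) := by
      rw [PySem.Set.mem_ofList]; exact List.mem_cons_self
    have hall : ∀ x ∈ PySem.Set.ofList (a :: l), x = a := by
      intro x hx
      rw [PySem.Set.mem_ofList, List.mem_cons] at hx
      rcases hx with rfl | hx
      · rfl
      · exact h x hx
    have hnd : (PySem.Set.ofList (a :: l)).Nodup := PySem.Set.nodup_ofList _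
    match hs : PySem.Set.ofList (a :: l) with
    | [] => rw [hs] at has; exact absurd has (List.not_mem_nil)
    | [b] => rfl
    | b :: c :: t =>
      rw [hs] at hall hnd
      have hb := hall b (List.mem_cons_self)
      have hc := hall c (List.mem_cons_of_mem _ List.mem_cons_self)
      rw [List.nodup_cons] at hnd
      exact absurd (by rw [hb, hc]; exact List.mem_cons_self) hnd.1

-- ===== VERDICT (by name: the statement is the Claim_ definition above) =====
theorem is_tabular_py_spec : Claim_equal_is_tabular_py := by
  intro data _
  unfold Spec_is_tabular_py is_tabular_py is_tabular_py_alt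
  match data with
  | [] => rfl
  | (k, first) :: rest =>
    simp only [List.isEmpty_cons, Bool.false_eq_true, if_false, List.map_cons]
    rw [show (((first :: List.map (fun x => x.2) rest).all fun _ => true) = true) from by simp]
    simp only [Bool.not_true, Bool.false_eq_true, if_false]
    rw [show ∀ (a : Nat), (a == 1) = decide (a = 1) from fun a => Bool.beq_eq_decide_eq a 1]
    rw [Bool.decide_congr (setOfList_len_one_iff _ _)]
    rw [Bool.decide_congr (show _ ↔ ((rest.all fun p => p.2.length == first.length) = true) from ?_)]
    · simp
    simp only [List.all_eq_true, List.mem_map, beq_iff_eq, forall_exists_index, and_imp]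
    constructor
    · intro h p hp
      have := h (p.2.length : Int) p.2 p hp rfl rfl
      omega
    · intro h x v p hp hv hx
      subst hv hx
      have := h p hp
      omega
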